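-- pv_equiv track=rewrite | github.com/kim-taewoo/TIL_PUBLIC | Algorithm/programmers/2020kakaoBlindRecruitment/2020kakaoBlindNew/문자열압축.py | go
-- ===== SOURCE A (Python) =====
-- def go(s, curr_size):
--     shorten = 0
--     start_idx = 0
--     compare_start_idx = start_idx + curr_size
--
--     cnt = 1
--     while compare_start_idx + curr_size <= len(s):
--         base_substring = s[start_idx:start_idx+curr_size]
--         compare_substring = s[compare_start_idx:compare_start_idx+curr_size]
--         if base_substring == compare_substring:
--             cnt += 1
--             compare_start_idx += curr_size
--         else:
--             if cnt > 1:
--                 shorten += (cnt-1) * curr_size - len(str(cnt))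
--             cnt = 1
--             start_idx = compare_start_idx
--             compare_start_idx = compare_start_idx + curr_size
--     if cnt > 1:
--         shorten += (cnt-1) * curr_size - len(str(cnt))
--
--     return len(s) - shorten
-- ===== SOURCE B (Python) =====
-- def _run(head, rest):
--     k = 0
--     while k < len(rest) and rest[k] == head:
--         k += 1
--     return k
--
--
-- def _rle(chunks):
--     if not chunks:
--         return []
--     head, rest = chunks[0], chunks[1:]
--     k = _run(head, rest)
--     return [(head, 1 + k)] + _rle(rest[k:])
--
--
-- def go(s, curr_size):
--     chunks = [s[i:i+curr_size] for i in range(0, len(s), curr_size)]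
--     shorten = sum((cnt - 1) * curr_size - len(str(cnt))
--                   for _, cnt in _rle(chunks) if cnt > 1)
--     return len(s) - shorten
-- ===== Notes on version B (the rewrite author's own statement) =====
-- stated objective: alternative
-- what changed: Replaces A's four-variable index-chasing while loop (start/compare pointers with slices recomputed each step) by building the chunk list once with range(0,len(s),curr_size), run-length encoding it recursively, and summing the savings of runs with count > 1.
import Mathlib
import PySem

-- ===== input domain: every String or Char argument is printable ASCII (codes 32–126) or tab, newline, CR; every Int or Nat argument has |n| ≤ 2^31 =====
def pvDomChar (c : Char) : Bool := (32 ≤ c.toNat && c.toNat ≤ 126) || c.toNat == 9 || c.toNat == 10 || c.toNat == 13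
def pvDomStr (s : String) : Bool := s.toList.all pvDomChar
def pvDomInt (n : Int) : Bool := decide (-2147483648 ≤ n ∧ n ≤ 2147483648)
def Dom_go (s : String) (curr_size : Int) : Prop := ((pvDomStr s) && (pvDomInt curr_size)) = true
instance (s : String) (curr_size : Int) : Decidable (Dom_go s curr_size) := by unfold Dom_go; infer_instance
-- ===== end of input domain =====

-- B replaces A's index-chasing while loop by chunking the string once and run-length
-- encoding the chunk list (objective: alternative decomposition, similar cost).

-- ===== PORT A =====
-- A's while loop; fuel is only a totality guard (with curr_size ≥ 1 the loop runs at
-- most len(s) times; for curr_size ≤ 0 the Python loops forever, excluded by Pre_).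
def goLoop (cs : List Char) (c : Int) : Nat → Int → Int → Int → Int → Int
  | 0, shorten, _start, _compare, cnt =>
      (cs.length : Int) -
        (if cnt > 1 then shorten + ((cnt - 1) * c - ((PySem.Int.toChars cnt).length : Int)) else shorten)
  | fuel + 1, shorten, start, compare, cnt =>
      if compare + c ≤ (cs.length : Int) then
        let base_substring := PySem.List.slice cs (some start) (some (start + c))
        let compare_substring := PySem.List.slice cs (some compare) (some (compare + c))
        if base_substring = compare_substring then
          goLoop cs c fuel shorten start (compare + c) (cnt + 1)
        else
          goLoop cs c fuel
            (if cnt > 1 then shorten + ((cnt - 1) * c - ((PySem.Int.toChars cnt).length : Int)) else shorten)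
            compare (compare + c) 1
      else
        (cs.length : Int) -
          (if cnt > 1 then shorten + ((cnt - 1) * c - ((PySem.Int.toChars cnt).length : Int)) else shorten)

def go (s : String) (curr_size : Int) : Int :=
  goLoop s.toList curr_size (s.toList.length + 1) 0 0 (0 + curr_size) 1

-- ===== PORT B =====
-- _run(head, rest): length of the equal prefix
def runAlt (head : List Char) : List (List Char) → Nat
  | [] => 0
  | y :: t => if y = head then 1 + runAlt head t else 0

-- _rle(chunks): run-length encoding of the chunk list
def rleAlt : List (List Char) → List (List Char × Int)
  | [] => []
  | x :: rest =>
      let k := runAlt x rest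
      (x, 1 + (k : Int)) :: rleAlt (rest.drop k)
termination_by l => l.length
decreasing_by simp

def go_alt (s : String) (curr_size : Int) : Int :=
  let cs := s.toList
  let chunks := (PySem.List.pyRange 0 (cs.length : Int) curr_size).map
      (fun i => PySem.List.slice cs (some i) (some (i + curr_size)))
  let shorten := ((rleAlt chunks).filterMap
      (fun p => if p.2 > 1 then some ((p.2 - 1) * curr_size - ((PySem.Int.toChars p.2).length : Int)) else none)).sum
  (cs.length : Int) - shorten

-- ===== PRECONDITION & SPEC =====
-- Pre_ excludes curr_size ≤ 0, on which Python A never terminates (its while loop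
-- re-tests a condition that can no longer become false); A returns on all other inputs.
def Pre_go (s : String) (curr_size : Int) : Prop := 1 ≤ curr_size
instance (s : String) (curr_size : Int) : Decidable (Pre_go s curr_size) := by unfold Pre_go; infer_instance

def pvWitness_go : String × Int := ("aabbaccc", 2)

def Spec_go (s : String) (curr_size : Int) (out : Int) : Prop := out = go_alt s curr_size
instance (s : String) (curr_size : Int) (out : Int) : Decidable (Spec_go s curr_size out) := by unfold Spec_go; infer_instance

-- ===== CLAIM (what is proved, stated in full; the proofs are below) =====
def Claim_equal_go : Prop := ∀ (s : String) (curr_size : Int), Dom_go s curr_size → Pre_go s curr_size → Spec_go s curr_size (go s curr_size)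

-- ===== LEMMAS AND PROOFS =====

-- saving contributed by one run of length cnt
def fval (c cnt : Int) : Int :=
  if cnt > 1 then (cnt - 1) * c - ((PySem.Int.toChars cnt).length : Int) else 0

-- streaming run-length "savings" accumulator (the abstract shape of A's loop)
def rleSave (c : Int) : List (List Char) → List Char → Int → Int → Int
  | [], _, cnt, sh => sh + fval c cnt
  | x :: t, b, cnt, sh =>
      if x = b then rleSave c t b (cnt + 1) sh else rleSave c t x 1 (sh + fval c cnt)

-- total saving of an encoded run list (the abstract shape of B's sum)
def sumSave (c : Int) (rs : List (List Char × Int)) : Int :=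
  (rs.filterMap
    (fun p => if p.2 > 1 then some ((p.2 - 1) * c - ((PySem.Int.toChars p.2).length : Int)) else none)).sum

def chunkAt (cs : List Char) (c' j : Nat) : List Char := (cs.drop (j * c')).take c'

theorem flush_eq (c cnt sh : Int) :
    (if cnt > 1 then sh + ((cnt - 1) * c - ((PySem.Int.toChars cnt).length : Int)) else sh)
      = sh + fval c cnt := by
  unfold fval; split_ifs <;> omega

theorem sumSave_cons (c : Int) (x : List Char) (k : Int) (rs : List (List Char × Int)) :
    sumSave c ((x, k) :: rs) = fval c k + sumSave c rs := by
  unfold sumSave fval; simp only [List.filterMap_cons]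
  split_ifs <;> simp

-- L1: A's fuelled index loop equals rleSave on the list of remaining full chunks
theorem loop_eq_rleSave (cs : List Char) (c' : Nat) (hc : 1 ≤ c')
    (fuel jb jc : Nat) (cnt sh : Int)
    (hfuel : cs.length / c' ≤ jc + fuel) :
    goLoop cs (c' : Int) fuel sh ((jb * c' : Nat) : Int) ((jc * c' : Nat) : Int) cnt
      = (cs.length : Int) -
        rleSave (c' : Int)
          ((List.range (cs.length / c' - jc)).map (fun k => chunkAt cs c' (jc + k)))
          (chunkAt cs c' jb) cnt sh := by
  induction fuel generalizing jb jc cnt sh with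
  | zero =>
      have hjc : cs.length / c' - jc = 0 := by omega
      simp only [goLoop, hjc, List.range_zero, List.map_nil, rleSave, flush_eq]
  | succ fuel ih =>
      by_cases hcond : jc < cs.length / c'
      · have hle : ((jc * c' : Nat) : Int) + (c' : Int) ≤ (cs.length : Int) := by
          have : (jc + 1) * c' ≤ cs.length := (Nat.le_div_iff_mul_le (by omega)).mp hcond
          push_cast
          push_cast at this ⊢
          nlinarith
        rw [goLoop]
        rw [if_pos hle]
        simp only []
        rw [show ((jb * c' : Nat) : Int) + (c' : Int) = (((jb * c' + c') : Nat) : Int) by push_cast; ring]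
        rw [show (((jb * c' + c') : Nat) : Int) = ((jb * c' : Nat) : Int) + ((c' : Nat) : Int) by push_cast; ring]
        rw [PySem.List.slice_natCast_add cs (jb * c') c']
        rw [show ((jc * c' : Nat) : Int) + (c' : Int) = ((jc * c' : Nat) : Int) + ((c' : Nat) : Int) from rfl]
        rw [PySem.List.slice_natCast_add cs (jc * c') c']
        have hrange : cs.length / c' - jc = (cs.length / c' - (jc + 1)) + 1 := by omega
        rw [hrange, List.range_succ_eq_map, List.map_cons, List.map_map]
        have hmap : (fun k => chunkAt cs c' (jc + k)) ∘ Nat.succ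
            = (fun k => chunkAt cs c' ((jc + 1) + k)) := by
          funext k; simp [Function.comp]; ring_nf
        rw [hmap]
        simp only [Nat.add_zero]
        show (if chunkAt cs c' jb = chunkAt cs c' jc then _ else _) = _
        rw [rleSave]
        by_cases heq : chunkAt cs c' jb = chunkAt cs c' jc
        · rw [if_pos heq, if_pos (show chunkAt cs c' jc = chunkAt cs c' jb from heq.symm),
              show ((jc * c' : Nat) : Int) + ((c' : Nat) : Int) = (((jc + 1) * c' : Nat) : Int) by push_cast; ring]
          exact ih jb (jc + 1) (cnt + 1) sh (by omega)
        · rw [if_neg heq, flush_eq,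
              if_neg (show ¬ chunkAt cs c' jc = chunkAt cs c' jb from fun h => heq h.symm),
              show ((jc * c' : Nat) : Int) + ((c' : Nat) : Int) = (((jc + 1) * c' : Nat) : Int) by push_cast; ring]
          exact ih jc (jc + 1) 1 _ (by omega)
      · have hle : ¬ (((jc * c' : Nat) : Int) + (c' : Int) ≤ (cs.length : Int)) := by
          intro h
          apply hcond
          have : (jc + 1) * c' ≤ cs.length := by push_cast at h; nlinarith
          exact (Nat.le_div_iff_mul_le (by omega)).mpr this
        rw [goLoop, if_neg hle]
        have hjc : cs.length / c' - jc = 0 := by omega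
        simp only [hjc, List.range_zero, List.map_nil, rleSave, flush_eq]

-- L2: rleSave versus the recursive RLE of B
theorem rleSave_eq_sumSave (c : Int) (l : List (List Char)) (b : List Char) (cnt sh : Int) :
    rleSave c l b cnt sh
      = sh + fval c (cnt + (runAlt b l : Int)) + sumSave c (rleAlt (l.drop (runAlt b l))) := by
  induction l generalizing b cnt sh with
  | nil => simp [rleSave, runAlt, rleAlt, sumSave]
  | cons x t ih =>
      by_cases hx : x = b
      · simp only [rleSave, runAlt, if_pos hx, ih]
        rw [show (1 + runAlt b t) = runAlt b t + 1 from Nat.add_comm _ _, List.drop_succ_cons]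
        push_cast; ring_nf
      · simp only [rleSave, runAlt, if_neg hx, ih, List.drop_zero, Nat.cast_zero, add_zero]
        rw [rleAlt]
        rw [sumSave_cons]
        ring_nf

theorem sumSave_rleAlt_cons (c : Int) (x : List Char) (l : List (List Char)) :
    sumSave c (rleAlt (x :: l)) = rleSave c l x 1 0 := by
  rw [rleAlt, sumSave_cons, rleSave_eq_sumSave]
  simp [add_comm]

-- L3: a trailing chunk of different length is a run of its own and saves nothing
theorem rleSave_append_partial (c : Int) (L : List (List Char)) (p : List Char)
    (b : List Char) (cnt sh : Int)
    (hb : p.length ≠ b.length) (hL : ∀ x ∈ L, p.length ≠ x.length) :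
    rleSave c (L ++ [p]) b cnt sh = rleSave c L b cnt sh := by
  induction L generalizing b cnt sh with
  | nil =>
      have hpb : p ≠ b := fun h => hb (by rw [h])
      simp [rleSave, if_neg hpb, fval]
  | cons x t ih =>
      have hx : p.length ≠ x.length := hL x (by simp)
      simp only [List.cons_append, rleSave]
      by_cases hxb : x = b
      · rw [if_pos hxb, if_pos hxb, ih b (cnt + 1) sh hb (fun y hy => hL y (by simp [hy]))]
      · rw [if_neg hxb, if_neg hxb, ih x 1 _ hx (fun y hy => hL y (by simp [hy]))]

theorem length_chunkAt (cs : List Char) (c' j : Nat) :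
    (chunkAt cs c' j).length = min c' (cs.length - j * c') := by
  simp [chunkAt]

-- L4: B's chunk list is the chunkAt sequence
theorem chunks_eq (cs : List Char) (c' : Nat) (hc : 1 ≤ c') :
    (PySem.List.pyRange 0 (cs.length : Int) (c' : Int)).map
        (fun i => PySem.List.slice cs (some i) (some (i + (c' : Int))))
      = (List.range ((cs.length + c' - 1) / c')).map (chunkAt cs c') := by
  rw [PySem.List.pyRange_of_pos 0 (cs.length : Int) (by exact_mod_cast hc)]
  have hif : (if (0:Int) < (cs.length : Int) then (((cs.length : Int) - 0 + (c' : Int) - 1) / (c' : Int)).toNat else 0)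
      = (cs.length + c' - 1) / c' := by
    split_ifs with h
    · have h1 : ((cs.length : Int) - 0 + (c' : Int) - 1) = ((cs.length + c' - 1 : Nat) : Int) := by
        push_cast [Nat.cast_sub (by omega : 1 ≤ cs.length + c')]; ring
      rw [h1]; norm_cast
    · have h0 : cs.length = 0 := by omega
      simp [h0, Nat.div_eq_of_lt (by omega : c' - 1 < c')]
  rw [hif, List.map_map]
  apply List.map_congr_left
  intro k _
  show PySem.List.slice cs (some ((0:Int) + (c':Int) * (k:Int))) (some ((0:Int) + (c':Int) * (k:Int) + (c':Int))) = _
  have : ((0:Int) + (c':Int) * (k:Int)) = ((k * c' : Nat) : Int) := by push_cast; ring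
  rw [this, PySem.List.slice_natCast_add cs (k * c') c']
  rfl


theorem chunk_full (cs : List Char) (c' j : Nat) (h : (j + 1) * c' ≤ cs.length) :
    (chunkAt cs c' j).length = c' := by
  rw [length_chunkAt]
  rw [Nat.succ_mul] at h
  omega

theorem main_bridge (cs : List Char) (c' : Nat) (hc : 1 ≤ c') :
    rleSave (c' : Int)
        ((List.range (cs.length / c' - 1)).map (fun k => chunkAt cs c' (1 + k)))
        (chunkAt cs c' 0) 1 0
      = sumSave (c' : Int) (rleAlt ((List.range ((cs.length + c' - 1) / c')).map (chunkAt cs c'))) := by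
  obtain ⟨q, r, hqr, hr⟩ : ∃ q r, cs.length = c' * q + r ∧ r < c' :=
    ⟨cs.length / c', cs.length % c', (Nat.div_add_mod _ _).symm, Nat.mod_lt _ (by omega)⟩
  have hm : cs.length / c' = q := by
    rw [hqr, Nat.mul_add_div (by omega), Nat.div_eq_of_lt hr, Nat.add_zero]
  have hmap : (fun k => chunkAt cs c' k) ∘ Nat.succ = fun k => chunkAt cs c' (1 + k) := by
    funext k; simp [Nat.succ_eq_add_one, Nat.add_comm]
  by_cases hr0 : r = 0
  · subst hr0
    rcases Nat.eq_zero_or_pos q with hq | hq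
    · subst hq
      have hn : cs.length = 0 := by omega
      simp [hn, rleSave, rleAlt, sumSave, fval, Nat.div_eq_of_lt (show c' - 1 < c' by omega)]
    · obtain ⟨q0, rfl⟩ : ∃ q0, q = q0 + 1 := ⟨q - 1, by omega⟩
      have hK : (cs.length + c' - 1) / c' = q0 + 1 := by
        rw [hqr, show c' * (q0 + 1) + 0 + c' - 1 = c' * (q0 + 1) + (c' - 1) by omega,
            Nat.mul_add_div (by omega), Nat.div_eq_of_lt (by omega), Nat.add_zero]
      rw [hK, hm, Nat.add_sub_cancel, List.range_succ_eq_map, List.map_cons, List.map_map,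
          hmap, sumSave_rleAlt_cons]
  · have h1 : (r + c' - 1) / c' = 1 :=
      Nat.div_eq_of_lt_le (by omega) (by rw [show (1 + 1) * c' = c' + c' by ring]; omega)
    have hK : (cs.length + c' - 1) / c' = q + 1 := by
      rw [hqr, show c' * q + r + c' - 1 = c' * q + (r + c' - 1) by omega,
          Nat.mul_add_div (by omega), h1]
    rw [hK, hm, List.range_succ_eq_map, List.map_cons, List.map_map, hmap, sumSave_rleAlt_cons]
    rcases Nat.eq_zero_or_pos q with hq | hq
    · subst hq; rfl
    · obtain ⟨q0, rfl⟩ : ∃ q0, q = q0 + 1 := ⟨q - 1, by omega⟩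
      rw [Nat.add_sub_cancel, List.range_succ, List.map_append, List.map_singleton]
      have hlen : cs.length = (q0 + 1) * c' + r := by rw [hqr, Nat.mul_comm]
      have hpart : (chunkAt cs c' (1 + q0)).length = r := by
        rw [length_chunkAt, Nat.add_comm 1 q0]
        rw [Nat.succ_mul] at hlen ⊢
        omega
      have hb : (chunkAt cs c' 0).length = c' := by
        apply chunk_full
        rw [Nat.one_mul]
        rw [Nat.succ_mul] at hlen
        omega
      symm
      apply rleSave_append_partial
      · rw [hpart, hb]; omega
      · intro x hx
        simp only [List.mem_map, List.mem_range] at hx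
        obtain ⟨k, hk, rfl⟩ := hx
        rw [hpart, chunk_full]
        · omega
        · calc (1 + k + 1) * c' ≤ (q0 + 1) * c' := by
                apply Nat.mul_le_mul_right; omega
            _ ≤ cs.length := by omega


-- ===== VERDICT (by name: the statement is the Claim_ definition above) =====
theorem go_spec : Claim_equal_go := by
  intro s c _hdom hpre
  have hpre : (1 : Int) ≤ c := hpre
  have hcc : ((c.toNat : Nat) : Int) = c := Int.toNat_of_nonneg (by omega)
  have hc1 : 1 ≤ c.toNat := by omega
  show go s c = go_alt s c
  have hA := loop_eq_rleSave s.toList c.toNat hc1 (s.toList.length + 1) 0 1 1 0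
      (by have := Nat.div_le_self s.toList.length c.toNat; omega)
  simp only [Nat.zero_mul, Nat.one_mul, Nat.cast_zero] at hA
  have hB : go_alt s c = (s.toList.length : Int) - sumSave ((c.toNat : Nat) : Int)
      (rleAlt ((PySem.List.pyRange 0 (s.toList.length : Int) ((c.toNat : Nat) : Int)).map
        (fun i => PySem.List.slice s.toList (some i) (some (i + ((c.toNat : Nat) : Int)))))) := by
    rw [hcc]; rfl
  rw [chunks_eq s.toList c.toNat hc1] at hB
  rw [hB,
      show go s c = goLoop s.toList ((c.toNat : Nat) : Int) (s.toList.length + 1) 0 0 ((c.toNat : Nat) : Int) 1 by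
        unfold go; rw [hcc, zero_add],
      hA, main_bridge s.toList c.toNat hc1]
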